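-- pv_equiv track=rewrite | github.com/guanhomer/mixmap | script/per_read_per_cpg.py | allowed_chrom
-- ===== SOURCE A (Python) =====
-- def allowed_chrom(chrom: str) -> bool:
--     """
--     Restrict processing to canonical chromosomes.
--
--     Accepted names:
--     - 1-22, X, Y, MT
--     - chr1-chr22, chrX, chrY, chrM, chrMT
--
--     Parameters
--     ----------
--     chrom : str
--         Reference name from the BAM header.
--
--     Returns
--     -------
--     bool
--         True if the chromosome is retained.
--     """
--     if chrom.startswith("chr"):
--         c = chrom[3:]
--     else:
--         c = chrom
--
--     if c == "M":
--         c = "MT"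
--
--     return c in {str(i) for i in range(1, 23)} | {"X", "Y", "MT"}
-- ===== SOURCE B (Python) =====
-- ALLOWED = frozenset([
--     "1", "2", "3", "4", "5", "6", "7", "8", "9", "10", "11",
--     "12", "13", "14", "15", "16", "17", "18", "19", "20", "21", "22",
--     "X", "Y", "M", "MT",
--     "chr1", "chr2", "chr3", "chr4", "chr5", "chr6", "chr7", "chr8",
--     "chr9", "chr10", "chr11", "chr12", "chr13", "chr14", "chr15",
--     "chr16", "chr17", "chr18", "chr19", "chr20", "chr21", "chr22",
--     "chrX", "chrY", "chrM", "chrMT",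
-- ])
--
--
-- def allowed_chrom(chrom: str) -> bool:
--     return chrom in ALLOWED
-- ===== Notes on version B (the rewrite author's own statement) =====
-- stated objective: simpler
-- what changed: A normalizes the name (strips an optional prefix, rewrites the mitochondrial alias) and then tests the normalized name against a set it rebuilds on every call; B precomputes one module-level frozenset of all 54 accepted literal names and returns a single membership test with no normalization.
import Mathlib
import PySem

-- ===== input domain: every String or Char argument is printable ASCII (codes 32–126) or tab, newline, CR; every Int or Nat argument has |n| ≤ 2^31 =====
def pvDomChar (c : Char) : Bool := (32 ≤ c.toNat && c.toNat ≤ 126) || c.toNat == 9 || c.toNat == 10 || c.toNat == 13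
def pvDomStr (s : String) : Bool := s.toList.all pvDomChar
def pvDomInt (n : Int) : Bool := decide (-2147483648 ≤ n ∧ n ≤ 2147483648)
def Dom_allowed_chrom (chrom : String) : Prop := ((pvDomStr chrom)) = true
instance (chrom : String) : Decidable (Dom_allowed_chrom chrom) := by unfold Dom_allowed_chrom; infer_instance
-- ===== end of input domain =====

-- B replaces A's strip-the-"chr"-prefix / rewrite-"M"-to-"MT" normalization followed by a
-- set test with a single membership test against one precomputed table of all 54 accepted
-- literal names (objective: simpler).

-- ===== PORT A =====
def allowed_chrom (chrom : String) : Bool :=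
  let c : String := if PySem.Str.startswith chrom "chr" then PySem.Str.slice chrom (some 3) none else chrom
  let c : String := if c = "M" then "MT" else c
  PySem.Set.contains
    (PySem.Set.union (PySem.Set.ofList ((PySem.List.pyRange 1 23 1).map PySem.Int.toStr)) ["X", "Y", "MT"]) c

-- ===== PORT B =====
def pvALLOWED : List String :=
  ["1", "2", "3", "4", "5", "6", "7", "8", "9", "10", "11",
   "12", "13", "14", "15", "16", "17", "18", "19", "20", "21", "22",
   "X", "Y", "M", "MT",
   "chr1", "chr2", "chr3", "chr4", "chr5", "chr6", "chr7", "chr8",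
   "chr9", "chr10", "chr11", "chr12", "chr13", "chr14", "chr15",
   "chr16", "chr17", "chr18", "chr19", "chr20", "chr21", "chr22",
   "chrX", "chrY", "chrM", "chrMT"]

def allowed_chrom_alt (chrom : String) : Bool := pvALLOWED.contains chrom

-- ===== PRECONDITION & SPEC =====
def Spec_allowed_chrom (chrom : String) (out : Bool) : Prop := out = allowed_chrom_alt chrom
instance (chrom : String) (out : Bool) : Decidable (Spec_allowed_chrom chrom out) := by unfold Spec_allowed_chrom; infer_instance

-- ===== CLAIM (what is proved, stated in full; the proofs are below) =====
def Claim_equal_allowed_chrom : Prop := ∀ (chrom : String), Dom_allowed_chrom chrom → Spec_allowed_chrom chrom (allowed_chrom chrom)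

-- ===== LEMMAS AND PROOFS =====

-- the base set A tests membership in, as a literal list
def pvBASE : List String :=
  ["1", "2", "3", "4", "5", "6", "7", "8", "9", "10", "11",
   "12", "13", "14", "15", "16", "17", "18", "19", "20", "21", "22",
   "X", "Y", "MT"]

theorem pvBase_eq :
    PySem.Set.union (PySem.Set.ofList ((PySem.List.pyRange 1 23 1).map PySem.Int.toStr)) ["X", "Y", "MT"]
      = pvBASE := by decide

theorem pvBase_sub : ∀ c ∈ pvBASE, c ∈ pvALLOWED := by decide

theorem pvBase_chr : ∀ c ∈ pvBASE, String.ofList ('c' :: 'h' :: 'r' :: c.toList) ∈ pvALLOWED := by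
  decide

theorem allowed_of_A (chrom : String) (hA : allowed_chrom chrom = true) : chrom ∈ pvALLOWED := by
  simp only [allowed_chrom, pvBase_eq] at hA
  by_cases h1 : PySem.Str.startswith chrom "chr" = true
  · rw [if_pos h1] at hA
    have hp : "chr".toList <+: chrom.toList := by
      simpa [PySem.Chars.startswith_iff] using h1
    obtain ⟨rest, hrest⟩ := hp
    have hsl : (PySem.Str.slice chrom (some 3) none).toList = rest := by
      simp [pysem, ← hrest]
    by_cases hm : PySem.Str.slice chrom (some 3) none = "M"
    · have : chrom = "chrM" := by
        apply String.toList_inj.mp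
        rw [← hrest, ← hsl, hm]; decide
      rw [this]; decide
    · rw [if_neg hm] at hA
      have hc : PySem.Str.slice chrom (some 3) none ∈ pvBASE := by
        simpa [PySem.Set.contains] using hA
      have : chrom = String.ofList ('c' :: 'h' :: 'r' :: (PySem.Str.slice chrom (some 3) none).toList) := by
        apply String.toList_inj.mp
        rw [hsl, ← hrest]; simp
      rw [this]
      exact pvBase_chr _ hc
  · rw [if_neg h1] at hA
    by_cases hm : chrom = "M"
    · rw [hm]; decide
    · rw [if_neg hm] at hA
      exact pvBase_sub _ (by simpa [PySem.Set.contains] using hA)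

-- ===== VERDICT (by name: the statement is the Claim_ definition above) =====
theorem allowed_chrom_spec : Claim_equal_allowed_chrom := by
  intro chrom _
  unfold Spec_allowed_chrom
  by_cases h : chrom ∈ pvALLOWED
  · fin_cases h <;> decide
  · have hb : allowed_chrom_alt chrom = false := by
      simpa [allowed_chrom_alt] using h
    have ha : allowed_chrom chrom = false := by
      by_contra hA
      exact h (allowed_of_A chrom (by simpa using hA))
    rw [ha, hb]
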